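-- pv_equiv track=rewrite | github.com/pozorvlak/cassidoo | 2023/2023-02-27_repeated_groups/repeated_groups.py | go
-- ===== SOURCE A (Python) =====
-- def go(xs):
--     if len(xs) == 0:
--         return
--     current = xs[0]
--     current_count = 1
--     for x in xs[1:]:
--         if x == current:
--             current_count += 1
--         else:
--             if current_count > 1:
--                 yield [current] * current_count
--             current = x
--             current_count = 1
--     if current_count > 1:
--         yield [current] * current_count
-- ===== SOURCE B (Python) =====
-- def go(xs):
--     # two-pointer span scan: find each maximal run [i, j) directly and yield
--     # the slice when it is longer than 1; no per-element state machine, no flush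
--     i = 0
--     n = len(xs)
--     while i < n:
--         j = i
--         while j < n and xs[j] == xs[i]:
--             j += 1
--         if j - i > 1:
--             yield xs[i:j]
--         i = j
-- ===== Notes on version B (the rewrite author's own statement) =====
-- stated objective: simpler
-- what changed: Replaces A's per-element current/current_count state machine with its end-of-sequence flush by a two-pointer scan that locates each maximal run [i,j) with an inner while and yields the slice xs[i:j] when longer than 1.
import Mathlib
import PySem

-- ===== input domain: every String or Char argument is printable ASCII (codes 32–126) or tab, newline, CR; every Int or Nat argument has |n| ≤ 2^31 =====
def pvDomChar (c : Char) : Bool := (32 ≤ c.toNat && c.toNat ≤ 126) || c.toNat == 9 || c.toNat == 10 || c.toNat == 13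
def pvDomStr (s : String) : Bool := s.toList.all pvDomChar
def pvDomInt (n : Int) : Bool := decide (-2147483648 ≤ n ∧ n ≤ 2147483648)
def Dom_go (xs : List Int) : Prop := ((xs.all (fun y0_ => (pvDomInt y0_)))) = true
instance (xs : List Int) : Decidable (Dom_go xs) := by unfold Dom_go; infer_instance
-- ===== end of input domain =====

-- B replaces A's current/current_count state machine (with its final flush) by a
-- two-pointer scan yielding each maximal run slice when it is longer than 1; same cost.

-- ===== PORT A =====
-- the 'for x in xs[1:]' loop with state (current, current_count); the code after
-- the loop (the final flush 'if current_count > 1: yield …') is the [] case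
def goLoop (ys : List Int) (current : Int) (current_count : Int) : List (List Int) :=
  match ys with
  | [] => if current_count > 1 then [List.replicate current_count.toNat current] else []
  | x :: rest =>
    if x = current then goLoop rest current (current_count + 1)
    else if current_count > 1 then
      List.replicate current_count.toNat current :: goLoop rest x 1
    else goLoop rest x 1

def go (xs : List Int) : List (List Int) :=
  match xs with
  | [] => []
  | x :: rest => goLoop rest x 1

-- ===== PORT B =====
-- outer while: one recursive step per run; inner while 'j += 1' = takeWhile,
-- 'i = j' = dropWhile; 'yield xs[i:j]' yields the run slice itself (x :: run)
def go_alt (xs : List Int) : List (List Int) :=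
  match xs with
  | [] => []
  | x :: rest =>
    let run := rest.takeWhile (· == x)
    let rest' := rest.dropWhile (· == x)
    if run.length + 1 > 1 then (x :: run) :: go_alt rest' else go_alt rest'
termination_by xs.length
decreasing_by
  all_goals exact Nat.lt_succ_of_le (List.length_dropWhile_le _ _)

-- ===== PRECONDITION & SPEC =====
def Spec_go (xs : List Int) (out : List (List Int)) : Prop := out = go_alt xs
instance (xs : List Int) (out : List (List Int)) : Decidable (Spec_go xs out) := by unfold Spec_go; infer_instance

-- ===== CLAIM (what is proved, stated in full; the proofs are below) =====
def Claim_equal_go : Prop := ∀ (xs : List Int), Dom_go xs → Spec_go xs (go xs)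

-- ===== LEMMAS AND PROOFS =====

-- the run slice B yields equals the replicate list A yields
lemma takeWhile_eq_replicate (c : Int) (ys : List Int) :
    ys.takeWhile (· == c) = List.replicate (ys.takeWhile (· == c)).length c := by
  induction ys with
  | nil => simp
  | cons y ys ih =>
    by_cases h : y = c
    · subst h
      rw [List.takeWhile_cons_of_pos (by simp)]
      simpa [List.replicate_succ] using ih
    · rw [List.takeWhile_cons_of_neg (by simp [h])]
      simp

lemma goLoop_span (ys : List Int) (c : Int) (k : Int) (hk : 1 ≤ k) :
    goLoop ys c k =
      if k + ((ys.takeWhile (· == c)).length : Int) > 1 then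
        List.replicate (k + ((ys.takeWhile (· == c)).length : Int)).toNat c
          :: go_alt (ys.dropWhile (· == c))
      else go_alt (ys.dropWhile (· == c)) := by
  induction ys generalizing c k with
  | nil => simp [goLoop, go_alt]
  | cons y ys ih =>
    by_cases h : y = c
    · subst h
      rw [List.takeWhile_cons_of_pos (by simp), List.dropWhile_cons_of_pos (by simp)]
      simp only [goLoop]
      rw [if_pos trivial, ih y (k + 1) (by omega)]
      have e : k + 1 + ((ys.takeWhile (· == y)).length : Int)
          = k + (((y :: ys.takeWhile (· == y)).length : Nat) : Int) := by
        push_cast [List.length_cons]; ring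
      rw [e]
    · have hb : (y == c) = false := by simp [h]
      rw [List.takeWhile_cons_of_neg (by simp [hb]), List.dropWhile_cons_of_neg (by simp [hb])]
      simp only [List.length_nil, Nat.cast_zero, add_zero]
      have hglue : goLoop ys y 1 = go_alt (y :: ys) := by
        rw [ih y 1 (le_refl 1), go_alt]
        by_cases hlen : (ys.takeWhile (· == y)).length = 0
        · simp [hlen]
        · rw [if_pos (by omega : (1 : Int) + ((ys.takeWhile (· == y)).length : Int) > 1),
              if_pos (by omega : (ys.takeWhile (· == y)).length + 1 > 1)]
          rw [show ((1 : Int) + ((ys.takeWhile (· == y)).length : Int)).toNat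
              = (ys.takeWhile (· == y)).length + 1 from by omega]
          rw [List.replicate_succ]
          congr 1
          congr 1
          exact (takeWhile_eq_replicate y ys).symm
      simp only [goLoop, if_neg h, hglue]

-- ===== VERDICT (by name: the statement is the Claim_ definition above) =====
theorem go_spec : Claim_equal_go := by
  intro xs _
  unfold Spec_go
  match xs with
  | [] => rw [go, go_alt]
  | x :: rest =>
    show goLoop rest x 1 = go_alt (x :: rest)
    rw [goLoop_span rest x 1 (le_refl 1), go_alt]
    by_cases hlen : (rest.takeWhile (· == x)).length = 0
    · simp [hlen]
    · rw [if_pos (by omega : (1 : Int) + ((rest.takeWhile (· == x)).length : Int) > 1),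
          if_pos (by omega : (rest.takeWhile (· == x)).length + 1 > 1)]
      rw [show ((1 : Int) + ((rest.takeWhile (· == x)).length : Int)).toNat
          = (rest.takeWhile (· == x)).length + 1 from by omega]
      rw [List.replicate_succ]
      congr 2
      exact (takeWhile_eq_replicate x rest).symm
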